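-- pv_equiv track=rewrite | github.com/NotAtitYet/Recognizance-23 | Workshop_1/Assignment1.py | even_sort
-- ===== SOURCE A (Python) =====
-- def even_sort(arr):
--     """
--     This function sorts the array giving higher preference to even numbers
--     args:
--         arr (list)
--     returns:
--         sort_arr (list)
--     ex:
--         arr = [15, 2, 6, 88, 7]
--         ## then
--         sort_arr = [2, 6, 88 ,7 ,15]
--         ## This is any even number is smaller than any odd number
--     """
--
--     # Code Here
--     e=[]
--     o=[]
--     for i in arr:
--         if i%2==0:
--             e.append(i)
--         else :
--             o.append(i)
--     e.sort()
--     o.sort()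
--     arr=[]
--     for i in e:
--         arr.append(i)
--     for i in o:
--         arr.append(i)
--     return arr
-- ===== SOURCE B (Python) =====
-- def even_sort(arr):
--     return sorted(arr, key=lambda x: (x % 2, x))
-- ===== Notes on version B (the rewrite author's own statement) =====
-- stated objective: idiomatic
-- what changed: Replaces the partition-into-two-buckets / sort-each / concatenate pipeline with a single stable sort under the composite key (x % 2, x).
import Mathlib
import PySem

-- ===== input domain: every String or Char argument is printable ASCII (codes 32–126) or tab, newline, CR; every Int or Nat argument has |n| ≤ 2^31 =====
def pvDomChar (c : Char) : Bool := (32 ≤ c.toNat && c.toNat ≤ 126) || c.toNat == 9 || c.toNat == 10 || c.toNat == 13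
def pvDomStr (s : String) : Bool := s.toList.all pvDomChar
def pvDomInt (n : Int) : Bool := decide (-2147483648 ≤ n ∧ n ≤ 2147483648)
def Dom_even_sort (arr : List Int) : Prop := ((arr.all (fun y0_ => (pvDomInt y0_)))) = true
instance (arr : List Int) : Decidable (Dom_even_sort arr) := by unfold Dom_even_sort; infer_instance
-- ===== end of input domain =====

-- B replaces A's partition / sort-each-bucket / concatenate pipeline with one stable sort
-- under the composite key (x % 2, x); same cost, more idiomatic.


-- ===== PORT A =====
def even_sort (arr : List Int) : List Int :=
  -- e=[]; o=[]; for i in arr: append to e or o by parity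
  let eo := arr.foldl
    (fun (s : List Int × List Int) i =>
      if PySem.Int.mod i 2 == 0 then (s.1 ++ [i], s.2) else (s.1, s.2 ++ [i]))
    ([], [])
  -- e.sort(); o.sort()
  let e := PySem.List.sorted eo.1 (fun x => x)
  let o := PySem.List.sorted eo.2 (fun x => x)
  -- arr=[]; for i in e: arr.append(i); for i in o: arr.append(i)
  let arr2 := e.foldl (fun acc i => acc ++ [i]) []
  o.foldl (fun acc i => acc ++ [i]) arr2

-- ===== PORT B =====
def even_sort_alt (arr : List Int) : List Int :=
  PySem.List.sorted2 arr (fun x => PySem.Int.mod x 2) (fun x => x)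

-- ===== PRECONDITION & SPEC =====
def Spec_even_sort (arr : List Int) (out : List Int) : Prop := out = even_sort_alt arr
instance (arr : List Int) (out : List Int) : Decidable (Spec_even_sort arr out) := by unfold Spec_even_sort; infer_instance

-- ===== CLAIM (what is proved, stated in full; the proofs are below) =====
def Claim_equal_even_sort : Prop := ∀ (arr : List Int), Dom_even_sort arr → Spec_even_sort arr (even_sort arr)

-- ===== LEMMAS AND PROOFS =====

-- The comparator sorted2 uses for key (x % 2, x), and its reflexive closure.
def esLt (a b : Int) : Bool :=
  decide (PySem.Int.mod a 2 < PySem.Int.mod b 2) ||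
    (!decide (PySem.Int.mod b 2 < PySem.Int.mod a 2) && decide (a < b))

def esLe (a b : Int) : Prop := esLt a b = true ∨ a = b

lemma esLt_iff (a b : Int) :
    esLt a b = true ↔ PySem.Int.mod a 2 < PySem.Int.mod b 2 ∨
      (¬ PySem.Int.mod b 2 < PySem.Int.mod a 2 ∧ a < b) := by
  simp [esLt]

lemma esLe_total (a b : Int) : esLt a b = false → esLt b a = true ∨ b = a := by
  intro h
  rcases eq_or_ne b a with he | hne
  · exact Or.inr he
  · left
    rw [esLt_iff]; rw [← Bool.not_eq_true, esLt_iff] at h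
    have hne' : a ≠ b := fun e => hne e.symm
    rcases lt_or_gt_of_ne hne' with h2 | h2 <;> omega

lemma esLe_trans (a b c : Int) : esLe a b → esLe b c → esLe a c := by
  rintro (hab | rfl) (hbc | rfl)
  · rw [esLt_iff] at hab hbc
    left; rw [esLt_iff]; omega
  · exact Or.inl hab
  · exact Or.inl hbc
  · exact Or.inr rfl

lemma esLe_antisymm (a b : Int) : esLe a b → esLe b a → a = b := by
  rintro (hab | rfl) h
  · rcases h with hba | rfl
    · rw [esLt_iff] at hab hba; omega
    · rfl
  · rfl

-- Inserting into an esLe-sorted list keeps it esLe-sorted.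
lemma insertBy_esLt_pairwise (x : Int) (ys : List Int)
    (h : ys.Pairwise esLe) : (PySem.List.insertBy esLt x ys).Pairwise esLe := by
  induction ys with
  | nil => simp [PySem.List.insertBy]
  | cons y ys ih =>
    by_cases hxy : esLt x y = true
    · simp only [PySem.List.insertBy, hxy, if_pos]
      refine List.Pairwise.cons ?_ h
      intro z hz
      rcases List.mem_cons.mp hz with rfl | hz
      · exact Or.inl hxy
      · exact esLe_trans x y z (Or.inl hxy) (List.rel_of_pairwise_cons h hz)
    · simp only [PySem.List.insertBy, hxy, if_neg, Bool.false_eq_true, not_false_iff]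
      refine List.Pairwise.cons ?_ (ih h.tail)
      intro z hz
      rw [PySem.List.mem_insertBy] at hz
      rcases hz with rfl | hz
      · rcases esLe_total z y (Bool.eq_false_iff.mpr (by simpa using hxy)) with h1 | h1
        · exact Or.inl h1
        · exact Or.inr h1
      · exact List.rel_of_pairwise_cons h hz

lemma foldl_insertBy_pairwise (xs : List Int) :
    ∀ acc : List Int, acc.Pairwise esLe →
      (xs.foldl (fun acc x => PySem.List.insertBy esLt x acc) acc).Pairwise esLe := by
  induction xs with
  | nil => intro acc h; simpa using h
  | cons x xs ih =>
    intro acc h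
    exact ih _ (insertBy_esLt_pairwise x acc h)

lemma insertBy_perm (x : Int) (ys : List Int) :
    (PySem.List.insertBy esLt x ys).Perm (x :: ys) := by
  induction ys with
  | nil => simp [PySem.List.insertBy]
  | cons y ys ih =>
    by_cases hxy : esLt x y = true
    · simp [PySem.List.insertBy, hxy]
    · simp only [PySem.List.insertBy, hxy, if_neg, Bool.false_eq_true, not_false_iff]
      exact (List.Perm.cons y ih).trans (List.Perm.swap x y ys)

lemma foldl_insertBy_perm (xs : List Int) :
    ∀ acc : List Int, (xs.foldl (fun acc x => PySem.List.insertBy esLt x acc) acc).Perm (acc ++ xs) := by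
  induction xs with
  | nil => intro acc; simp
  | cons x xs ih =>
    intro acc
    refine (ih _).trans ?_
    have h1 : (PySem.List.insertBy esLt x acc ++ xs).Perm ((x :: acc) ++ xs) :=
      (insertBy_perm x acc).append_right xs
    refine h1.trans ?_
    exact List.perm_middle.symm

lemma even_sort_alt_eq_foldl (arr : List Int) :
    even_sort_alt arr = arr.foldl (fun acc x => PySem.List.insertBy esLt x acc) [] := by
  rfl

-- Any esLe-sorted rearrangement of arr IS even_sort_alt arr.
lemma even_sort_alt_unique (arr ys : List Int) (hperm : ys.Perm arr)
    (hpw : ys.Pairwise esLe) : even_sort_alt arr = ys := by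
  rw [even_sort_alt_eq_foldl]
  refine List.Perm.eq_of_pairwise (fun a b _ _ h1 h2 => esLe_antisymm a b h1 h2) ?_ hpw ?_
  · exact foldl_insertBy_pairwise arr [] (by simp)
  · exact ((foldl_insertBy_perm arr []).trans (by simp)).trans hperm.symm

-- A's partition loop is a pair of filters.
lemma split_foldl (l : List Int) : ∀ e o : List Int,
    l.foldl (fun (s : List Int × List Int) i =>
        if PySem.Int.mod i 2 == 0 then (s.1 ++ [i], s.2) else (s.1, s.2 ++ [i])) (e, o)
      = (e ++ l.filter (fun i => PySem.Int.mod i 2 == 0),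
         o ++ l.filter (fun i => !(PySem.Int.mod i 2 == 0))) := by
  induction l with
  | nil => intro e o; simp
  | cons x l ih =>
    intro e o
    by_cases hx : (PySem.Int.mod x 2 == 0) = true
    · rw [List.foldl_cons, if_pos hx, ih]
      simp [List.filter_cons]
      exact (PySem.Int.mod_eq_zero_iff_dvd x 2).mp (by simpa using hx)
    · rw [List.foldl_cons, if_neg hx, ih]
      simp [List.filter_cons]
      have h1 : PySem.Int.mod x 2 = 1 := by
        rcases PySem.Int.mod_two_eq x with h0 | h1
        · exact absurd (by simpa using h0) hx
        · exact h1
      rw [← PySem.Int.mod_eq_emod_of_pos (b := 2) (by norm_num)]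
      exact h1

lemma even_sort_eq (arr : List Int) :
    even_sort arr =
      PySem.List.sorted (arr.filter (fun i => PySem.Int.mod i 2 == 0)) (fun x => x) ++
      PySem.List.sorted (arr.filter (fun i => !(PySem.Int.mod i 2 == 0))) (fun x => x) := by
  simp only [even_sort, split_foldl arr [] [], List.nil_append,
    PySem.List.foldl_append_singleton]

lemma mod_two_eq_zero_of_mem_even {a : Int} {arr : List Int}
    (h : a ∈ arr.filter (fun i => PySem.Int.mod i 2 == 0)) : PySem.Int.mod a 2 = 0 := by
  have := List.of_mem_filter h
  simpa using this

lemma mod_two_eq_one_of_mem_odd {a : Int} {arr : List Int}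
    (h : a ∈ arr.filter (fun i => !(PySem.Int.mod i 2 == 0))) : PySem.Int.mod a 2 = 1 := by
  have := List.of_mem_filter h
  rcases PySem.Int.mod_two_eq a with h0 | h1
  · rw [h0] at this; exact absurd this (by decide)
  · exact h1

lemma even_sort_pairwise (arr : List Int) : (even_sort arr).Pairwise esLe := by
  rw [even_sort_eq]
  rw [List.pairwise_append]
  refine ⟨?_, ?_, ?_⟩
  · refine (PySem.List.sorted_pairwise _ _).imp_of_mem ?_
    intro a b ha hb hle
    have ha' := mod_two_eq_zero_of_mem_even ((PySem.List.mem_sorted _ _ _ _).mp ha)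
    have hb' := mod_two_eq_zero_of_mem_even ((PySem.List.mem_sorted _ _ _ _).mp hb)
    rcases eq_or_lt_of_le hle with rfl | hlt
    · exact Or.inr rfl
    · exact Or.inl ((esLt_iff a b).mpr (Or.inr ⟨by omega, hlt⟩))
  · refine (PySem.List.sorted_pairwise _ _).imp_of_mem ?_
    intro a b ha hb hle
    have ha' := mod_two_eq_one_of_mem_odd ((PySem.List.mem_sorted _ _ _ _).mp ha)
    have hb' := mod_two_eq_one_of_mem_odd ((PySem.List.mem_sorted _ _ _ _).mp hb)
    rcases eq_or_lt_of_le hle with rfl | hlt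
    · exact Or.inr rfl
    · exact Or.inl ((esLt_iff a b).mpr (Or.inr ⟨by omega, hlt⟩))
  · intro a ha b hb
    have ha' := mod_two_eq_zero_of_mem_even ((PySem.List.mem_sorted _ _ _ _).mp ha)
    have hb' := mod_two_eq_one_of_mem_odd ((PySem.List.mem_sorted _ _ _ _).mp hb)
    exact Or.inl ((esLt_iff a b).mpr (Or.inl (by omega)))

lemma even_sort_perm (arr : List Int) : (even_sort arr).Perm arr := by
  rw [even_sort_eq]
  refine (List.Perm.append (PySem.List.sorted_perm _ _ _) (PySem.List.sorted_perm _ _ _)).trans ?_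
  exact List.filter_append_perm _ arr

-- ===== VERDICT (by name: the statement is the Claim_ definition above) =====
theorem even_sort_spec : Claim_equal_even_sort := by
  intro arr _
  show even_sort arr = even_sort_alt arr
  exact (even_sort_alt_unique arr (even_sort arr) (even_sort_perm arr)
    (even_sort_pairwise arr)).symm
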